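-- pv_equiv track=rewrite | github.com/cbradshaw11/game-concept | scripts/ci/check_content_volume.py | check_template_counts
-- ===== SOURCE A (Python) =====
-- def check_template_counts(templates, min_count=5):
--     counts = {}
--     for t in templates:
--         ring = t["ring"]
--         counts[ring] = counts.get(ring, 0) + 1
--     failures = []
--     for ring in ["inner", "mid", "outer"]:
--         n = counts.get(ring, 0)
--         if n < min_count:
--             failures.append(f"  {ring}: {n} templates (need >= {min_count})")
--     return failures
-- ===== SOURCE B (Python) =====
-- def check_template_counts(templates, min_count=5):
--     rings = sorted(t["ring"] for t in templates)
--     runs = []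
--     for r in rings:
--         if runs and runs[-1][0] == r:
--             runs[-1] = (r, runs[-1][1] + 1)
--         else:
--             runs.append((r, 1))
--     failures = []
--     for ring in ["inner", "mid", "outer"]:
--         n = next((c for s, c in runs if s == ring), 0)
--         if n < min_count:
--             failures.append(f"  {ring}: {n} templates (need >= {min_count})")
--     return failures
-- ===== Notes on version B (the rewrite author's own statement) =====
-- stated objective: alternative
-- what changed: Replaces A's hash-map counting pass by a sort-then-scan algorithm: B sorts the ring names, run-length-encodes the sorted list into (ring, count) runs, and reads each of the three rings' counts from the first matching run (sortedness makes equal rings one contiguous run).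
import Mathlib
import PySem

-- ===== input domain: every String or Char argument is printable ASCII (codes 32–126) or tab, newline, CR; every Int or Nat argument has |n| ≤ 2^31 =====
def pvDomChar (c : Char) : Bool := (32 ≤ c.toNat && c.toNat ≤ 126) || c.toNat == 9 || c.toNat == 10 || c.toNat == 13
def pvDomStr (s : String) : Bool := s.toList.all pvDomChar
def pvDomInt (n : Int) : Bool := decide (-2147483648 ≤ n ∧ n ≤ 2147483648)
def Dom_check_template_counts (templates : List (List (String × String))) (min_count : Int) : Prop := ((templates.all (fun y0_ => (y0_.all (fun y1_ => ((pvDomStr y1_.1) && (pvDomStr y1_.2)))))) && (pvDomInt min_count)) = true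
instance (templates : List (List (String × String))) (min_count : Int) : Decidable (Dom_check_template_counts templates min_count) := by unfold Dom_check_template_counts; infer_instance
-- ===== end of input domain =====

-- B replaces A's hash-map counting pass by sort + run-length encoding: equal rings become one
-- contiguous run of the sorted list, and each ring's count is read off its (first) run. Objective: alternative.
-- ===== PORT A =====
-- t["ring"]: first-match lookup; total form with default "" — Pre_ guarantees the key is present.
def pvRingA (t : List (String × String)) : String := ((PySem.Dict.mk t).get? "ring").getD ""

def pvMsgA (ring : String) (n min_count : Int) : String :=
  "  " ++ ring ++ ": " ++ PySem.Int.toStr n ++ " templates (need >= " ++ PySem.Int.toStr min_count ++ ")"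

def check_template_counts (templates : List (List (String × String))) (min_count : Int) : List String :=
  let counts : PySem.Dict String Int :=
    templates.foldl (fun d t =>
      let ring := pvRingA t
      d.insert ring (d.getD ring 0 + 1)) PySem.Dict.empty
  ["inner", "mid", "outer"].foldl (fun failures ring =>
    let n := counts.getD ring 0
    if n < min_count then failures ++ [pvMsgA ring n min_count] else failures) []

-- ===== PORT B =====
def pvRingB (t : List (String × String)) : String := ((PySem.Dict.mk t).get? "ring").getD ""

def pvMsgB (ring : String) (n min_count : Int) : String :=
  "  " ++ ring ++ ": " ++ PySem.Int.toStr n ++ " templates (need >= " ++ PySem.Int.toStr min_count ++ ")"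

-- one step of the run-length-encoding loop body (runs[-1] inspect/replace, else append)
def pvRleStep (runs : List (String × Int)) (r : String) : List (String × Int) :=
  match runs.getLast? with
  | some (s, c) => if s == r then runs.dropLast ++ [(r, c + 1)] else runs ++ [(r, 1)]
  | none => [(r, 1)]

-- next((c for s, c in runs if s == ring), 0)
def pvLookup (runs : List (String × Int)) (ring : String) : Int :=
  ((runs.find? (fun p => p.1 == ring)).map Prod.snd).getD 0

def check_template_counts_alt (templates : List (List (String × String))) (min_count : Int) : List String :=
  let rings := PySem.List.sorted (templates.map pvRingB) (fun x => x) false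
  let runs := rings.foldl pvRleStep []
  ["inner", "mid", "outer"].foldl (fun failures ring =>
    let n := pvLookup runs ring
    if n < min_count then failures ++ [pvMsgB ring n min_count] else failures) []

-- ===== PRECONDITION & SPEC =====
-- Pre_ excludes templates lacking a "ring" key, on which the Python A (and B) raise KeyError.
def Pre_check_template_counts (templates : List (List (String × String))) (min_count : Int) : Prop :=
  templates.all (fun t => (PySem.Dict.mk t).contains "ring") = true
instance (templates : List (List (String × String))) (min_count : Int) : Decidable (Pre_check_template_counts templates min_count) := by unfold Pre_check_template_counts; infer_instance
def pvWitness_check_template_counts : (List (List (String × String))) × Int := ([[("ring", "inner")], [("ring", "mid")]], 1)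

def Spec_check_template_counts (templates : List (List (String × String))) (min_count : Int) (out : List String) : Prop := out = check_template_counts_alt templates min_count
instance (templates : List (List (String × String))) (min_count : Int) (out : List String) : Decidable (Spec_check_template_counts templates min_count out) := by unfold Spec_check_template_counts; infer_instance

-- ===== CLAIM (what is proved, stated in full; the proofs are below) =====
def Claim_equal_check_template_counts : Prop := ∀ (templates : List (List (String × String))) (min_count : Int), Dom_check_template_counts templates min_count → Pre_check_template_counts templates min_count → Spec_check_template_counts templates min_count (check_template_counts templates min_count)

-- ===== LEMMAS AND PROOFS =====
-- A's dict fold computes, for each ring, the count of templates with that ring.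
theorem counts_go (l : List (List (String × String))) (d : PySem.Dict String Int) (ring : String) :
    (l.foldl (fun d t => d.insert (pvRingA t) (d.getD (pvRingA t) 0 + 1)) d).getD ring 0
      = d.getD ring 0 + (l.countP (fun t => pvRingA t == ring) : Int) := by
  induction l generalizing d with
  | nil => simp
  | cons t l ih =>
    simp only [List.foldl_cons, ih, PySem.Dict.getD_insert, List.countP_cons]
    by_cases h : pvRingA t = ring
    · simp [h]; ring
    · have h2 : (pvRingA t == ring) = false := by simp [h]
      simp [Ne.symm h, h2]

-- appending a fresh run whose key differs from all existing keys
theorem lookup_snoc (rs : List (String × Int)) (a : String) (v : Int) (ring : String)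
    (h : ∀ k ∈ rs.map Prod.fst, k ≠ a) :
    pvLookup (rs ++ [(a, v)]) ring = pvLookup rs ring + (if a == ring then v else 0) := by
  unfold pvLookup
  rw [List.find?_append]
  cases hf : rs.find? (fun p => p.1 == ring) with
  | some p =>
    have hp : p.1 = ring := by simpa using List.find?_some hf
    have hane : a ≠ ring := by
      intro hae
      exact h p.1 (List.mem_map_of_mem (List.mem_of_find?_eq_some hf)) (hp.trans hae.symm)
    simp [hane]
  | none => by_cases hae : a = ring <;> simp [hae]

-- effect of one RLE step on a looked-up count (keys strictly increasing and ≤ the new element)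
theorem step_lookup (runs : List (String × Int)) (a ring : String)
    (h1 : (runs.map Prod.fst).Pairwise (· < ·))
    (hle : ∀ k ∈ runs.map Prod.fst, k ≤ a) :
    pvLookup (pvRleStep runs a) ring = pvLookup runs ring + (if a == ring then 1 else 0) := by
  rcases runs.eq_nil_or_concat with rfl | ⟨init, ⟨s, c⟩, rfl⟩
  · unfold pvRleStep pvLookup
    by_cases hae : a = ring
    · simp [hae]
    · simp [hae]
  · simp only [List.concat_eq_append] at h1 hle ⊢
    rw [List.map_append] at h1
    have hkeys_lt : ∀ k ∈ init.map Prod.fst, k < s := by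
      intro k hk
      exact (List.pairwise_append.mp h1).2.2 k hk s (by simp)
    have hsa : s ≤ a := hle s (by simp)
    by_cases hse : s = a
    · have hstep : pvRleStep (init ++ [(s, c)]) a = init ++ [(a, c + 1)] := by
        simp [pvRleStep, hse]
      rw [hstep, lookup_snoc init a (c + 1) ring
          (fun k hk => hse ▸ ne_of_lt (hkeys_lt k hk)),
        lookup_snoc init s c ring (fun k hk => ne_of_lt (hkeys_lt k hk))]
      subst hse
      split_ifs <;> ring
    · have hstep : pvRleStep (init ++ [(s, c)]) a = (init ++ [(s, c)]) ++ [(a, 1)] := by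
        have hb : (s == a) = false := by simpa using hse
        simp [pvRleStep, hb]
      have hklt : ∀ k ∈ (init ++ [(s, c)]).map Prod.fst, k ≠ a := by
        intro k hk
        rcases (by simpa using hk : k ∈ init.map Prod.fst ∨ k = s) with hk' | rfl
        · exact ne_of_lt (lt_of_lt_of_le (hkeys_lt k hk') hsa)
        · exact hse
      rw [hstep, lookup_snoc (init ++ [(s, c)]) a 1 ring hklt]

-- the new key list stays strictly increasing
theorem step_keys_sorted (runs : List (String × Int)) (a : String)
    (h1 : (runs.map Prod.fst).Pairwise (· < ·))
    (hle : ∀ k ∈ runs.map Prod.fst, k ≤ a) :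
    ((pvRleStep runs a).map Prod.fst).Pairwise (· < ·) := by
  rcases runs.eq_nil_or_concat with rfl | ⟨init, ⟨s, c⟩, rfl⟩
  · simp [pvRleStep]
  · simp only [List.concat_eq_append] at h1 hle ⊢
    rw [List.map_append] at h1
    have hkeys_lt : ∀ k ∈ init.map Prod.fst, k < s := by
      intro k hk
      exact (List.pairwise_append.mp h1).2.2 k hk s (by simp)
    have hsa : s ≤ a := hle s (by simp)
    by_cases hse : s = a
    · have hstep : pvRleStep (init ++ [(s, c)]) a = init ++ [(a, c + 1)] := by
        simp [pvRleStep, hse]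
      rw [hstep, List.map_append, List.pairwise_append]
      refine ⟨(List.pairwise_append.mp h1).1, by simp, ?_⟩
      intro x hx y hy
      rcases (by simpa using hy : y = a) with rfl
      exact hse ▸ hkeys_lt x hx
    · have hstep : pvRleStep (init ++ [(s, c)]) a = (init ++ [(s, c)]) ++ [(a, 1)] := by
        have hb : (s == a) = false := by simpa using hse
        simp [pvRleStep, hb]
      rw [hstep, List.map_append, List.pairwise_append]
      refine ⟨by rw [List.map_append]; exact h1, by simp, ?_⟩
      intro x hx y hy
      rcases (by simpa using hy : y = a) with rfl
      rcases (by simpa using hx : x ∈ init.map Prod.fst ∨ x = s) with hx' | rfl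
      · exact lt_of_lt_of_le (hkeys_lt x hx') (lt_of_le_of_ne hsa hse).le
      · exact lt_of_le_of_ne hsa hse

-- every new key is ≤ the element just consumed
theorem step_keys_le (runs : List (String × Int)) (a : String)
    (hle : ∀ k ∈ runs.map Prod.fst, k ≤ a) :
    ∀ k ∈ (pvRleStep runs a).map Prod.fst, k ≤ a := by
  intro k hk
  rcases runs.eq_nil_or_concat with rfl | ⟨init, ⟨s, c⟩, rfl⟩
  · simp [pvRleStep] at hk
    exact le_of_eq hk
  · simp only [List.concat_eq_append] at hle hk
    by_cases hse : s = a
    · rw [show pvRleStep (init ++ [(s, c)]) a = init ++ [(a, c + 1)] from by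
        simp [pvRleStep, hse]] at hk
      simp only [List.map_append, List.mem_append, List.map_cons, List.map_nil,
        List.mem_cons, List.not_mem_nil, or_false] at hk
      rcases hk with hk' | rfl
      · exact hle k (by simp only [List.map_append, List.mem_append]; exact Or.inl hk')
      · exact le_refl k
    · rw [show pvRleStep (init ++ [(s, c)]) a = (init ++ [(s, c)]) ++ [(a, 1)] from by
        have hb : (s == a) = false := by simpa using hse
        simp [pvRleStep, hb]] at hk
      simp only [List.map_append, List.mem_append, List.map_cons, List.map_nil,
        List.mem_cons, List.not_mem_nil, or_false] at hk
      rcases hk with hk' | rfl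
      · exact hle k (by
          simp only [List.map_append, List.mem_append, List.map_cons, List.map_nil,
            List.mem_cons, List.not_mem_nil, or_false]
          exact hk')
      · exact le_refl k

-- the RLE fold invariant: with strictly increasing existing keys all ≤ the (sorted) remaining
-- elements, each ring's looked-up count grows by its count in the remaining elements.
theorem rle_lookup (l : List String) (runs : List (String × Int)) (ring : String)
    (h1 : (runs.map Prod.fst).Pairwise (· < ·))
    (h2 : ∀ x ∈ l, ∀ k ∈ runs.map Prod.fst, k ≤ x)
    (h3 : l.Pairwise (· ≤ ·)) :
    pvLookup (l.foldl pvRleStep runs) ring = pvLookup runs ring + (l.countP (· == ring) : Int) := by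
  induction l generalizing runs with
  | nil => simp
  | cons a t ih =>
    have h3t : t.Pairwise (· ≤ ·) := (List.pairwise_cons.mp h3).2
    have hat : ∀ x ∈ t, a ≤ x := (List.pairwise_cons.mp h3).1
    have hlea : ∀ k ∈ runs.map Prod.fst, k ≤ a := h2 a (by simp)
    rw [List.foldl_cons,
      ih (pvRleStep runs a) (step_keys_sorted runs a h1 hlea)
        (fun x hx k hk => le_trans (step_keys_le runs a hlea k hk) (hat x hx)) h3t,
      step_lookup runs a ring h1 hlea, List.countP_cons]
    by_cases hae : a = ring <;> simp [hae]; ring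

-- B's sorted+RLE count of each ring equals the plain count over templates.
theorem alt_count (templates : List (List (String × String))) (ring : String) :
    pvLookup ((PySem.List.sorted (templates.map pvRingB) (fun x => x) false).foldl pvRleStep []) ring
      = (templates.countP (fun t => pvRingA t == ring) : Int) := by
  have hs : (PySem.List.sorted (templates.map pvRingB) (fun x => x) false).Pairwise (· ≤ ·) := by
    simpa using PySem.List.sorted_pairwise (templates.map pvRingB) (fun x => x)
  rw [rle_lookup _ [] ring (by simp) (by simp) hs]
  have hperm := PySem.List.sorted_perm (templates.map pvRingB) (fun x => x) false
  rw [hperm.countP_eq, List.countP_map]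
  simp only [pvLookup, List.find?_nil, Option.map_none, Option.getD_none, Function.comp_def,
    pvRingA, pvRingB, zero_add]

-- ===== VERDICT (by name: the statement is the Claim_ definition above) =====
theorem check_template_counts_spec : Claim_equal_check_template_counts := by
  intro templates min_count _ _
  show check_template_counts templates min_count = check_template_counts_alt templates min_count
  simp only [check_template_counts, check_template_counts_alt]
  simp only [List.foldl_cons, List.foldl_nil, counts_go, PySem.Dict.getD_empty, zero_add, alt_count,
    List.nil_append]
  split_ifs <;> simp [pvMsgA, pvMsgB]
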